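-- pv_equiv track=rewrite | github.com/several-dozen-lizards/The-Kay-Wrapper | Kay/K-0/session_browser/session_loader.py | _select_key_turns
-- ===== SOURCE A (Python) =====
-- from typing import Dict, List, Any, Optional
--
-- def _select_key_turns(
--
--     conversation: List[Dict[str, str]],
--     max_turns: int = 5
-- ) -> List[int]:
--     """
--     Select key turns from conversation using heuristics
--
--     Returns:
--         List of turn indices
--     """
--
--     key_turns = []
--
--     # Always include first and last
--     if len(conversation) > 0:
--         key_turns.append(0)
--     if len(conversation) > 1:
--         key_turns.append(len(conversation) - 1)
--
--     # Score middle turns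
--     scores = []
--     for idx in range(1, len(conversation) - 1):
--         turn = conversation[idx]
--         content = turn.get("content", "")
--
--         score = 0
--
--         # Long messages
--         if len(content) > 200:
--             score += 2
--
--         # Questions
--         if "?" in content:
--             score += 1
--
--         # Emotional indicators
--         emotional_words = {"realize", "understand", "feel", "important", "interesting"}
--         if any(word in content.lower() for word in emotional_words):
--             score += 1
--
--         scores.append((idx, score))
--
--     # Sort by score and take top N
--     scores.sort(key=lambda x: x[1], reverse=True)
--     key_turns.extend([idx for idx, score in scores[:max_turns - 2]])
--
--     # Sort by index
--     key_turns.sort()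
--
--     return key_turns
-- ===== SOURCE B (Python) =====
-- def _select_key_turns(conversation, max_turns=5):
--     n = len(conversation)
--
--     def score(turn):
--         content = turn.get("content", "")
--         s = 2 if len(content) > 200 else 0
--         if "?" in content:
--             s += 1
--         low = content.lower()
--         if any(w in low for w in ("realize", "understand", "feel", "important", "interesting")):
--             s += 1
--         return s
--
--     # counting sort: group the middle turns by score, best score first, ties by index
--     buckets = [[] for _ in range(5)]
--     for i in range(1, n - 1):
--         buckets[score(conversation[i])].append(i)
--     ranked = [i for bucket in reversed(buckets) for i in bucket]
--
--     picked = set(ranked[:max_turns - 2])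
--     return [i for i in range(n) if i == 0 or i == n - 1 or i in picked]
-- ===== Notes on version B (the rewrite author's own statement) =====
-- stated objective: alternative
-- what changed: B replaces A's stable sort of (idx,score) pairs and final index sort by a counting sort (score buckets 0..4 filled in index order, read best-first), a slice of the ranked index list, and a single increasing-index output pass.
import Mathlib
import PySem

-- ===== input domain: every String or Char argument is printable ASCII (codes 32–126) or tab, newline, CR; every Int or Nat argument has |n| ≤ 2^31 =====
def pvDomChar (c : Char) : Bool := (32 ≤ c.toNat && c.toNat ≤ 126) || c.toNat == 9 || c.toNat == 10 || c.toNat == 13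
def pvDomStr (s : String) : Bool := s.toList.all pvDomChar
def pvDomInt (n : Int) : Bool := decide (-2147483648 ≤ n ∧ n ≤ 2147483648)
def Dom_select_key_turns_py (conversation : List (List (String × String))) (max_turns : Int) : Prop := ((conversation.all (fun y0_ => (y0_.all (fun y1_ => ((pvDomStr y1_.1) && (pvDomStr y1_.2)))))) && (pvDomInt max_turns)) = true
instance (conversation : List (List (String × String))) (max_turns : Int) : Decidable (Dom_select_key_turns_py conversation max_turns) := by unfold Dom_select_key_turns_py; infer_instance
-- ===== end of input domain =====

-- B replaces A's sort-of-(idx,score)-pairs + final sort by a counting sort into score buckets 0..4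
-- plus one increasing-index output pass; objective: alternative (no speed claim).

-- Both Pythons score a middle turn by the identical four-line heuristic; shared helper.
def pvScoreTurn (conversation : List (List (String × String))) (idx : Int) : Int :=
  let turn := PySem.List.pyGetD conversation idx []
  let content := PySem.Dict.getD (PySem.Dict.mk turn) "content" ""
  let score : Int := 0
  let score := if 200 < PySem.Str.len content then score + 2 else score
  let score := if PySem.Str.isIn "?" content then score + 1 else score
  let low := PySem.Str.lower content
  let score := if ([ "realize", "understand", "feel", "important", "interesting" ] : List String).any
      (fun w => PySem.Str.isIn w low) then score + 1 else score
  score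

-- ===== PORT A =====
def select_key_turns_py (conversation : List (List (String × String))) (max_turns : Int) : List Int :=
  let key_turns : List Int :=
    (if 0 < conversation.length then [(0 : Int)] else []) ++
    (if 1 < conversation.length then [(conversation.length : Int) - 1] else [])
  let scores : List (Int × Int) :=
    (PySem.List.pyRange 1 ((conversation.length : Int) - 1)).foldl
      (fun acc idx => acc ++ [(idx, pvScoreTurn conversation idx)]) []
  let scores := PySem.List.sorted scores (fun p => p.2) true
  let key_turns := key_turns ++
    (PySem.List.slice scores none (some (max_turns - 2))).map (fun p => p.1)
  PySem.List.sorted key_turns (fun x => x) false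

-- ===== PORT B =====
def select_key_turns_py_alt (conversation : List (List (String × String))) (max_turns : Int) : List Int :=
  let n : Int := (conversation.length : Int)
  let buckets : List (List Int) :=
    (PySem.List.pyRange 1 (n - 1)).foldl
      (fun bs i => bs.set (pvScoreTurn conversation i).toNat
        (bs.getD (pvScoreTurn conversation i).toNat [] ++ [i]))
      [[], [], [], [], []]
  let ranked : List Int := buckets.reverse.flatten
  let picked := PySem.Set.ofList (PySem.List.slice ranked none (some (max_turns - 2)))
  (PySem.List.pyRange 0 n).filter (fun i => i == 0 || i == n - 1 || picked.contains i)

-- ===== PRECONDITION & SPEC =====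
def Spec_select_key_turns_py (conversation : List (List (String × String))) (max_turns : Int) (out : List Int) : Prop := out = select_key_turns_py_alt conversation max_turns
instance (conversation : List (List (String × String))) (max_turns : Int) (out : List Int) : Decidable (Spec_select_key_turns_py conversation max_turns out) := by unfold Spec_select_key_turns_py; infer_instance

-- ===== CLAIM (what is proved, stated in full; the proofs are below) =====
def Claim_equal_select_key_turns_py : Prop := ∀ (conversation : List (List (String × String))) (max_turns : Int), Dom_select_key_turns_py conversation max_turns → Spec_select_key_turns_py conversation max_turns (select_key_turns_py conversation max_turns)

-- ===== LEMMAS AND PROOFS =====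

theorem pvScoreTurn_bounds (conversation : List (List (String × String))) (idx : Int) :
    0 ≤ pvScoreTurn conversation idx ∧ pvScoreTurn conversation idx ≤ 4 := by
  unfold pvScoreTurn
  dsimp only
  split_ifs <;> norm_num

theorem pv_insertBy_append_left {α : Type} (before : α → α → Bool) (x : α) (l1 l2 : List α)
    (h1 : ∀ y ∈ l1, before x y = false) :
    PySem.List.insertBy before x (l1 ++ l2) = l1 ++ PySem.List.insertBy before x l2 := by
  induction l1 with
  | nil => rfl
  | cons z zs ih =>
    have hz : before x z = false := h1 z (by simp)
    simp only [List.cons_append, PySem.List.insertBy, hz]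
    simp [ih (fun y hy => h1 y (by simp [hy]))]

theorem pv_insertBy_all_true {α : Type} (before : α → α → Bool) (x : α) (l : List α)
    (h : ∀ y ∈ l, before x y = true) :
    PySem.List.insertBy before x l = x :: l := by
  cases l with
  | nil => rfl
  | cons y ys => simp [PySem.List.insertBy, h y (by simp)]

-- the contents of the five buckets of a list of (idx, score) pairs, concatenated 4..0
def pvB (l : List (Int × Int)) : List (Int × Int) :=
  l.filter (fun p => p.2 == 4) ++ (l.filter (fun p => p.2 == 3) ++
    (l.filter (fun p => p.2 == 2) ++ (l.filter (fun p => p.2 == 1) ++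
      l.filter (fun p => p.2 == 0))))

theorem pv_step_bucket (x : Int × Int) (hx0 : 0 ≤ x.2) (hx4 : x.2 ≤ 4) (ps : List (Int × Int)) :
    PySem.List.insertBy (fun a b => decide (b.2 < a.2)) x (pvB ps) = pvB (ps ++ [x]) := by
  have hmem : ∀ (s : Int) (y : Int × Int), y ∈ ps.filter (fun p => p.2 == s) → y.2 = s := by
    intro s y hy
    have := (List.mem_filter.mp hy).2
    simpa using this
  have hfalse : ∀ (s : Int), ¬ (s < x.2) → ∀ y ∈ ps.filter (fun p => p.2 == s),
      (fun a b => decide ((b:Int×Int).2 < (a:Int×Int).2)) x y = false := by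
    intro s hs y hy
    have := hmem s y hy
    simp [this]; omega
  have htrue : ∀ (s : Int), s < x.2 → ∀ y ∈ ps.filter (fun p => p.2 == s),
      (fun a b => decide ((b:Int×Int).2 < (a:Int×Int).2)) x y = true := by
    intro s hs y hy
    have := hmem s y hy
    simp [this]; omega
  have hcase : x.2 = 0 ∨ x.2 = 1 ∨ x.2 = 2 ∨ x.2 = 3 ∨ x.2 = 4 := by omega
  unfold pvB
  rcases hcase with h | h | h | h | h
  · -- x.2 = 0 : appended at the very end
    rw [pv_insertBy_append_left _ _ _ _ (hfalse 4 (by omega)),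
        pv_insertBy_append_left _ _ _ _ (hfalse 3 (by omega)),
        pv_insertBy_append_left _ _ _ _ (hfalse 2 (by omega)),
        pv_insertBy_append_left _ _ _ _ (hfalse 1 (by omega)),
        PySem.List.insertBy_of_forall_not_before _ _ _ (hfalse 0 (by omega))]
    simp [List.filter_append, h]
  · -- x.2 = 1
    rw [pv_insertBy_append_left _ _ _ _ (hfalse 4 (by omega)),
        pv_insertBy_append_left _ _ _ _ (hfalse 3 (by omega)),
        pv_insertBy_append_left _ _ _ _ (hfalse 2 (by omega)),
        pv_insertBy_append_left _ _ _ _ (hfalse 1 (by omega)),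
        pv_insertBy_all_true _ _ _ (htrue 0 (by omega))]
    simp [List.filter_append, h]
  · -- x.2 = 2
    rw [pv_insertBy_append_left _ _ _ _ (hfalse 4 (by omega)),
        pv_insertBy_append_left _ _ _ _ (hfalse 3 (by omega)),
        pv_insertBy_append_left _ _ _ _ (hfalse 2 (by omega)),
        pv_insertBy_all_true _ _ _ (fun y hy => by
          rcases List.mem_append.mp hy with h' | h'
          exacts [htrue 1 (by omega) y h', htrue 0 (by omega) y h'])]
    simp [List.filter_append, h]
  · -- x.2 = 3
    rw [pv_insertBy_append_left _ _ _ _ (hfalse 4 (by omega)),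
        pv_insertBy_append_left _ _ _ _ (hfalse 3 (by omega)),
        pv_insertBy_all_true _ _ _ (fun y hy => by
          rcases List.mem_append.mp hy with h' | h'
          · exact htrue 2 (by omega) y h'
          rcases List.mem_append.mp h' with h'' | h''
          exacts [htrue 1 (by omega) y h'', htrue 0 (by omega) y h''])]
    simp [List.filter_append, h]
  · -- x.2 = 4
    rw [pv_insertBy_append_left _ _ _ _ (hfalse 4 (by omega)),
        pv_insertBy_all_true _ _ _ (fun y hy => by
          rcases List.mem_append.mp hy with h' | h'
          · exact htrue 3 (by omega) y h'
          rcases List.mem_append.mp h' with h'' | h''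
          · exact htrue 2 (by omega) y h''
          rcases List.mem_append.mp h'' with h3 | h3
          exacts [htrue 1 (by omega) y h3, htrue 0 (by omega) y h3])]
    simp [List.filter_append, h]

-- stable reverse sort with keys in {0..4} = the buckets 4,3,2,1,0, each in original order
theorem pv_buckets_aux (xs : List (Int × Int)) :
    ∀ ps : List (Int × Int), (∀ p ∈ xs, 0 ≤ p.2 ∧ p.2 ≤ 4) →
    xs.foldl (fun acc x => PySem.List.insertBy (fun a b => decide (b.2 < a.2)) x acc) (pvB ps)
      = pvB (ps ++ xs) := by
  induction xs with
  | nil => intro ps _; simp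
  | cons x xs ih =>
    intro ps h
    have hx := h x (by simp)
    simp only [List.foldl_cons]
    rw [pv_step_bucket x hx.1 hx.2 ps, ih (ps ++ [x]) (fun p hp => h p (by simp [hp]))]
    simp

theorem pv_sorted_buckets (xs : List (Int × Int)) (h : ∀ p ∈ xs, 0 ≤ p.2 ∧ p.2 ≤ 4) :
    PySem.List.sorted xs (fun p => p.2) true = pvB xs := by
  rw [PySem.List.sorted_rev_eq_foldl_insertBy]
  have := pv_buckets_aux xs [] h
  simpa [pvB] using this

theorem pv_pairwise_pyRange (a b : Int) : (PySem.List.pyRange a b).Pairwise (· < ·) := by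
  simp only [PySem.List.pyRange]
  norm_num
  split_ifs
  · exact List.pairwise_map.mpr ((List.pairwise_lt_range).imp (by intro i j hij; omega))
  · simp

theorem pv_nodup_pyRange (a b : Int) : (PySem.List.pyRange a b).Nodup := by
  exact (pv_pairwise_pyRange a b).imp (fun h => ne_of_lt h)

-- B's filled bucket array, as filters of the index range
theorem pv_fold_buckets (f : Int → Int) (xs : List Int) :
    ∀ l0 l1 l2 l3 l4 : List Int, (∀ i ∈ xs, 0 ≤ f i ∧ f i ≤ 4) →
    xs.foldl (fun bs i => bs.set (f i).toNat (bs.getD (f i).toNat [] ++ [i]))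
      [l0, l1, l2, l3, l4]
    = [l0 ++ xs.filter (fun i => f i == 0), l1 ++ xs.filter (fun i => f i == 1),
       l2 ++ xs.filter (fun i => f i == 2), l3 ++ xs.filter (fun i => f i == 3),
       l4 ++ xs.filter (fun i => f i == 4)] := by
  induction xs with
  | nil => intro l0 l1 l2 l3 l4 _; simp
  | cons x xs ih =>
    intro l0 l1 l2 l3 l4 h
    have hx := h x (by simp)
    have hcase : f x = 0 ∨ f x = 1 ∨ f x = 2 ∨ f x = 3 ∨ f x = 4 := by omega
    simp only [List.foldl_cons, List.filter_cons]
    rcases hcase with hc | hc | hc | hc | hc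
    · rw [hc, show ([l0, l1, l2, l3, l4] : List (List Int)).set (Int.toNat 0)
          (([l0, l1, l2, l3, l4] : List (List Int)).getD (Int.toNat 0) [] ++ [x])
          = [l0 ++ [x], l1, l2, l3, l4] from rfl,
        ih _ _ _ _ _ (fun i hi => h i (by simp [hi]))]
      simp
    · rw [hc, show ([l0, l1, l2, l3, l4] : List (List Int)).set (Int.toNat 1)
          (([l0, l1, l2, l3, l4] : List (List Int)).getD (Int.toNat 1) [] ++ [x])
          = [l0, l1 ++ [x], l2, l3, l4] from rfl,
        ih _ _ _ _ _ (fun i hi => h i (by simp [hi]))]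
      simp
    · rw [hc, show ([l0, l1, l2, l3, l4] : List (List Int)).set (Int.toNat 2)
          (([l0, l1, l2, l3, l4] : List (List Int)).getD (Int.toNat 2) [] ++ [x])
          = [l0, l1, l2 ++ [x], l3, l4] from rfl,
        ih _ _ _ _ _ (fun i hi => h i (by simp [hi]))]
      simp
    · rw [hc, show ([l0, l1, l2, l3, l4] : List (List Int)).set (Int.toNat 3)
          (([l0, l1, l2, l3, l4] : List (List Int)).getD (Int.toNat 3) [] ++ [x])
          = [l0, l1, l2, l3 ++ [x], l4] from rfl,
        ih _ _ _ _ _ (fun i hi => h i (by simp [hi]))]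
      simp
    · rw [hc, show ([l0, l1, l2, l3, l4] : List (List Int)).set (Int.toNat 4)
          (([l0, l1, l2, l3, l4] : List (List Int)).getD (Int.toNat 4) [] ++ [x])
          = [l0, l1, l2, l3, l4 ++ [x]] from rfl,
        ih _ _ _ _ _ (fun i hi => h i (by simp [hi]))]
      simp

-- a prefix slice commutes with map
theorem pv_map_slice_to {α β : Type} (f : α → β) (l : List α) (b : Int) :
    (PySem.List.slice l none (some b)).map f = PySem.List.slice (l.map f) none (some b) := by
  rcases le_or_gt 0 b with hb | hb
  · rw [PySem.List.slice_to _ hb, PySem.List.slice_to _ hb, List.map_take]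
  · have hrepr : b = -(((-b).toNat : Nat) : Int) := by omega
    rw [hrepr, PySem.List.slice_to_neg_natCast _ _ (by omega),
        PySem.List.slice_to_neg_natCast _ _ (by omega), List.map_take, List.length_map]

-- a prefix slice is a take
theorem pv_slice_to_take {α : Type} (l : List α) (b : Int) :
    ∃ k : Nat, PySem.List.slice l none (some b) = l.take k := by
  rcases le_or_gt 0 b with hb | hb
  · exact ⟨b.toNat, PySem.List.slice_to _ hb⟩
  · have hrepr : b = -(((-b).toNat : Nat) : Int) := by omega
    refine ⟨l.length - (-b).toNat, ?_⟩
    conv_lhs => rw [hrepr]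
    rw [PySem.List.slice_to_neg_natCast _ _ (by omega)]

theorem pv_flat_nodup (xs : List Int) (f : Int → Int) (hnd : xs.Nodup) :
    (([4, 3, 2, 1, 0] : List Int).flatMap (fun s => xs.filter (fun i => f i == s))).Nodup := by
  rw [List.nodup_flatMap]
  constructor
  · intro s _; exact hnd.filter _
  · have hdisj : ∀ s t : Int, s ≠ t →
        (xs.filter (fun i => f i == s)).Disjoint (xs.filter (fun i => f i == t)) := by
      intro s t hst a ha hb
      have h1 := (List.mem_filter.mp ha).2
      have h2 := (List.mem_filter.mp hb).2
      simp only [beq_iff_eq] at h1 h2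
      exact hst (h1 ▸ h2 ▸ rfl)
    simp only [List.pairwise_cons, Function.onFun, List.not_mem_nil, false_implies,
      implies_true, List.Pairwise.nil, and_true]
    refine ⟨?_, ?_, ?_, ?_⟩ <;> intro b hb <;> simp at hb <;>
      rcases hb with rfl | rfl | rfl | rfl <;> exact hdisj _ _ (by norm_num)

theorem pv_flat_mem (xs : List Int) (f : Int → Int) (h : ∀ i ∈ xs, 0 ≤ f i ∧ f i ≤ 4) (a : Int) :
    (a ∈ ([4, 3, 2, 1, 0] : List Int).flatMap (fun s => xs.filter (fun i => f i == s)))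
      ↔ a ∈ xs := by
  simp only [List.mem_flatMap, List.mem_filter, beq_iff_eq]
  constructor
  · rintro ⟨s, _, hmem, _⟩; exact hmem
  · intro ha
    refine ⟨f a, ?_, ha, rfl⟩
    have := h a ha
    simp only [List.mem_cons]
    omega

theorem pv_final (c : List (List (String × String))) (C : List Int)
    (hC : ∀ i ∈ C, 1 ≤ i ∧ i < (c.length : Int) - 1) (hnd : C.Nodup) :
    PySem.List.sorted
      (((if 0 < c.length then [(0 : Int)] else []) ++
        (if 1 < c.length then [(c.length : Int) - 1] else [])) ++ C)
      (fun x => x) false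
    = (PySem.List.pyRange 0 (c.length : Int)).filter
        (fun i => i == 0 || i == (c.length : Int) - 1 || (PySem.Set.ofList C).contains i) := by
  have hpw : ((PySem.List.pyRange 0 (c.length : Int)).filter
      (fun i => i == 0 || i == (c.length : Int) - 1 || (PySem.Set.ofList C).contains i)).Pairwise
      (· < ·) := (pv_pairwise_pyRange 0 _).sublist List.filter_sublist
  apply PySem.List.sorted_id_eq_of_perm_of_pairwise
  · -- permutation
    have hnotin0 : (0 : Int) ∉ C := fun hm => by have := hC _ hm; omega
    have hnotinN : ((c.length : Int) - 1) ∉ C := fun hm => by have := hC _ hm; omega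
    have hnd1 : (((if 0 < c.length then [(0 : Int)] else []) ++
        (if 1 < c.length then [(c.length : Int) - 1] else [])) ++ C).Nodup := by
      by_cases h1 : 0 < c.length <;> by_cases h2 : 1 < c.length <;>
        simp [h1, h2, hnd, hnotin0, hnotinN] <;> omega
    rw [List.perm_ext_iff_of_nodup (hpw.imp (fun h => ne_of_lt h)) hnd1]
    intro a
    by_cases hac : a ∈ C
    · have hb := hC a hac
      simp [List.mem_filter, PySem.List.mem_pyRange_one, hac, PySem.Set.mem_ofList]
      omega
    · by_cases h1 : 0 < c.length <;> by_cases h2 : 1 < c.length <;>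
        simp [List.mem_filter, PySem.List.mem_pyRange_one, hac, PySem.Set.mem_ofList, h1,
          h2] <;> omega
  · exact hpw.imp (fun h => le_of_lt h)

set_option maxHeartbeats 2000000 in
theorem pv_main (c : List (List (String × String))) (mt : Int) :
    select_key_turns_py c mt = select_key_turns_py_alt c mt := by
  unfold select_key_turns_py select_key_turns_py_alt
  dsimp only
  -- the scored middle turns, as A builds them
  have hfold : (PySem.List.pyRange 1 ((c.length : Int) - 1)).foldl
      (fun acc idx => acc ++ [(idx, pvScoreTurn c idx)]) []
      = (PySem.List.pyRange 1 ((c.length : Int) - 1)).map (fun i => (i, pvScoreTurn c i)) := by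
    simpa using PySem.List.foldl_append_singleton_eq_map
      (fun i => (i, pvScoreTurn c i)) (PySem.List.pyRange 1 ((c.length : Int) - 1)) []
  have hb : ∀ p ∈ (PySem.List.pyRange 1 ((c.length : Int) - 1)).map
      (fun i => (i, pvScoreTurn c i)), 0 ≤ p.2 ∧ p.2 ≤ 4 := by
    intro p hp
    obtain ⟨i, _, rfl⟩ := List.mem_map.mp hp
    exact pvScoreTurn_bounds c i
  -- B's ranked list is A's descending stable sort projected to indices
  have hranked : ((PySem.List.pyRange 1 ((c.length : Int) - 1)).foldl
      (fun bs i => bs.set (pvScoreTurn c i).toNat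
        (bs.getD (pvScoreTurn c i).toNat [] ++ [i])) [[], [], [], [], []]).reverse.flatten
      = (pvB ((PySem.List.pyRange 1 ((c.length : Int) - 1)).map
          (fun i => (i, pvScoreTurn c i)))).map (fun p => p.1) := by
    rw [pv_fold_buckets (pvScoreTurn c) _ [] [] [] [] []
      (fun i _ => pvScoreTurn_bounds c i)]
    simp [pvB, List.filter_map, Function.comp_def]
  rw [hfold, pv_sorted_buckets _ hb, hranked, pv_map_slice_to]
  -- the slice of the ranked index list is a prefix of it
  obtain ⟨k, hk⟩ := pv_slice_to_take ((pvB ((PySem.List.pyRange 1 ((c.length : Int) - 1)).map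
      (fun i => (i, pvScoreTurn c i)))).map (fun p => p.1)) (mt - 2)
  -- the ranked index list, as a flatMap of filters (for membership/nodup facts)
  have hmap : (pvB ((PySem.List.pyRange 1 ((c.length : Int) - 1)).map
        (fun i => (i, pvScoreTurn c i)))).map (fun p => p.1)
      = ([4, 3, 2, 1, 0] : List Int).flatMap (fun s =>
          (PySem.List.pyRange 1 ((c.length : Int) - 1)).filter
            (fun i => pvScoreTurn c i == s)) := by
    simp [pvB, List.flatMap_cons, List.filter_map, Function.comp_def]
  apply pv_final
  · intro i hi
    rw [hk, hmap] at hi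
    have h1 := List.mem_of_mem_take hi
    have h2 := (pv_flat_mem _ _ (fun j _ => pvScoreTurn_bounds c j) i).mp h1
    have := PySem.List.mem_pyRange_one.mp h2
    omega
  · rw [hk, hmap]
    exact (pv_flat_nodup _ _ (pv_nodup_pyRange _ _)).sublist (List.take_sublist _ _)

-- ===== VERDICT (by name: the statement is the Claim_ definition above) =====
theorem select_key_turns_py_spec : Claim_equal_select_key_turns_py := by
  intro conversation max_turns _
  unfold Spec_select_key_turns_py
  exact pv_main conversation max_turns
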